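-- pv_equiv track=rewrite | github.com/reynierortegabueno86/intellintents | backend/app/classifiers/transformer_classifier.py | _build_label_map
-- ===== SOURCE A (Python) =====
-- from typing import List, Tuple, Dict, Any, Optional
--
-- def _normalize(s: str) -> str:
--     """Normalize a label for fuzzy matching."""
--     return s.lower().strip().replace("_", " ").replace("-", " ").replace(".", " ")
--
-- def _build_label_map(
--     model_labels: List[str],
--     taxonomy_names: List[str],
--     user_label_map: Optional[Dict[str, str]] = None,
-- ) -> Dict[str, str]:
--     """
--     Build a mapping from model output labels → taxonomy category names.
--
--     Priority:
--     1. User-provided explicit mapping (model_label → taxonomy_label)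
--     2. Exact match (model label == taxonomy name)
--     3. Normalized fuzzy match (case/underscore/hyphen insensitive)
--     4. Unmapped labels pass through as-is
--     """
--     mapping: Dict[str, str] = {}
--     tax_norm = {_normalize(t): t for t in taxonomy_names}
--
--     for ml in model_labels:
--         # 1. User override
--         if user_label_map and ml in user_label_map:
--             mapping[ml] = user_label_map[ml]
--             continue
--
--         # 2. Exact match
--         if ml in taxonomy_names:
--             mapping[ml] = ml
--             continue
--
--         # 3. Normalized match
--         ml_norm = _normalize(ml)
--         if ml_norm in tax_norm:
--             mapping[ml] = tax_norm[ml_norm]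
--             continue
--
--         # 4. Pass through
--         mapping[ml] = ml
--
--     return mapping
-- ===== SOURCE B (Python) =====
-- from typing import List, Dict, Optional
--
-- def _normalize(s: str) -> str:
--     """Normalize a label for fuzzy matching."""
--     return s.lower().strip().replace("_", " ").replace("-", " ").replace(".", " ")
--
-- def _build_label_map(
--     model_labels: List[str],
--     taxonomy_names: List[str],
--     user_label_map: Optional[Dict[str, str]] = None,
-- ) -> Dict[str, str]:
--     # Layered passes in reverse priority order: each later pass overwrites
--     # earlier ones, so the last writer wins (user > exact > normalized > passthrough).
--     tax_norm = {_normalize(t): t for t in taxonomy_names}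
--
--     # Layer 4: everything passes through as-is.
--     mapping: Dict[str, str] = {ml: ml for ml in model_labels}
--
--     # Layer 3: normalized fuzzy matches.
--     for ml in model_labels:
--         n = _normalize(ml)
--         if n in tax_norm:
--             mapping[ml] = tax_norm[n]
--
--     # Layer 2: exact matches.
--     for ml in model_labels:
--         if ml in taxonomy_names:
--             mapping[ml] = ml
--
--     # Layer 1: user overrides.
--     if user_label_map:
--         for ml in model_labels:
--             if ml in user_label_map:
--                 mapping[ml] = user_label_map[ml]
--
--     return mapping
-- ===== Notes on version B (the rewrite author's own statement) =====
-- stated objective: alternative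
-- what changed: Replaces A's single loop with a per-label if/elif priority chain by four independent layered passes applied in reverse priority order (passthrough, then normalized match, then exact match, then user override), relying on last-writer-wins dict overwriting to reproduce the same precedence.
import Mathlib
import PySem

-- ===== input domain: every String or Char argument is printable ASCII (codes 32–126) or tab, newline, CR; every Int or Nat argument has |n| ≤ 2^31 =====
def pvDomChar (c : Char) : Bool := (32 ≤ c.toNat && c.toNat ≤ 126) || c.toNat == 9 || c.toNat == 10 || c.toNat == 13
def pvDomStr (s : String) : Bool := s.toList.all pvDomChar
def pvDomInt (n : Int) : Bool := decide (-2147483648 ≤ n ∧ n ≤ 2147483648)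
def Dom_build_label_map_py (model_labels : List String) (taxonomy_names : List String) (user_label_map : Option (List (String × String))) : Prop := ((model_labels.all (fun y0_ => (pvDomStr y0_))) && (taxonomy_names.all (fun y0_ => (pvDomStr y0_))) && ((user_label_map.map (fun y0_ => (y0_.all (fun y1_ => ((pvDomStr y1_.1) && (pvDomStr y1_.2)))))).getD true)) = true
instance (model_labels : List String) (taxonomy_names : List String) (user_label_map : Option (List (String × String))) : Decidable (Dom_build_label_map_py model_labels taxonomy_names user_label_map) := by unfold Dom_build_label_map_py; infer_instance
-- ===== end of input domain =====

-- B rebuilds the map in four layered passes applied in reverse priority order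
-- (last writer wins) instead of A's single loop with an if/elif priority chain;
-- objective: alternative decomposition (same cost).

-- ===== PORT A =====

-- _normalize(s): s.lower().strip().replace("_"," ").replace("-"," ").replace("."," ")
def pvNorm (s : String) : String :=
  PySem.Str.replace (PySem.Str.replace (PySem.Str.replace
    (PySem.Str.strip (PySem.Str.lower s)) "_" " ") "-" " ") "." " "

-- tax_norm = {_normalize(t): t for t in taxonomy_names}   (shared by both Pythons verbatim)
def pvTaxNorm (taxonomy_names : List String) : PySem.Dict String String :=
  taxonomy_names.foldl (fun d t => d.insert (pvNorm t) t) PySem.Dict.empty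

-- the Optional[dict] argument as a dict (none ~ {})
def pvUserD (user_label_map : Option (List (String × String))) : PySem.Dict String String :=
  PySem.Dict.ofList (user_label_map.getD [])

def build_label_map_py (model_labels : List String) (taxonomy_names : List String) (user_label_map : Option (List (String × String))) : List (String × String) :=
  let tax_norm := pvTaxNorm taxonomy_names
  let userD := pvUserD user_label_map
  -- Python truthiness of `user_label_map` in `if user_label_map and ml in user_label_map`
  let userActive : Bool := match user_label_map with
    | none => false
    | some l => !l.isEmpty
  (model_labels.foldl (fun mapping ml =>
      if userActive && userD.contains ml then mapping.insert ml (userD.getD ml ml)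
      else if taxonomy_names.contains ml then mapping.insert ml ml
      else if tax_norm.contains (pvNorm ml) then mapping.insert ml (tax_norm.getD (pvNorm ml) ml)
      else mapping.insert ml ml) PySem.Dict.empty).items

-- ===== PORT B =====

def build_label_map_py_alt (model_labels : List String) (taxonomy_names : List String) (user_label_map : Option (List (String × String))) : List (String × String) :=
  let tax_norm := pvTaxNorm taxonomy_names
  -- Layer 4: everything passes through as-is.
  let m0 := model_labels.foldl (fun mapping ml => mapping.insert ml ml) PySem.Dict.empty
  -- Layer 3: normalized fuzzy matches.
  let m1 := model_labels.foldl (fun mapping ml =>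
      if tax_norm.contains (pvNorm ml) then mapping.insert ml (tax_norm.getD (pvNorm ml) ml)
      else mapping) m0
  -- Layer 2: exact matches.
  let m2 := model_labels.foldl (fun mapping ml =>
      if taxonomy_names.contains ml then mapping.insert ml ml else mapping) m1
  -- Layer 1: user overrides (skipped when user_label_map is falsy).
  let userD := pvUserD user_label_map
  let m3 := match user_label_map with
    | none => m2
    | some l =>
        if l.isEmpty then m2
        else model_labels.foldl (fun mapping ml =>
          if userD.contains ml then mapping.insert ml (userD.getD ml ml) else mapping) m2
  m3.items

-- ===== PRECONDITION & SPEC =====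
def Spec_build_label_map_py (model_labels : List String) (taxonomy_names : List String) (user_label_map : Option (List (String × String))) (out : List (String × String)) : Prop := out = build_label_map_py_alt model_labels taxonomy_names user_label_map
instance (model_labels : List String) (taxonomy_names : List String) (user_label_map : Option (List (String × String))) (out : List (String × String)) : Decidable (Spec_build_label_map_py model_labels taxonomy_names user_label_map out) := by unfold Spec_build_label_map_py; infer_instance

-- ===== CLAIM (what is proved, stated in full; the proofs are below) =====
def Claim_equal_build_label_map_py : Prop := ∀ (model_labels : List String) (taxonomy_names : List String) (user_label_map : Option (List (String × String))), Dom_build_label_map_py model_labels taxonomy_names user_label_map → Spec_build_label_map_py model_labels taxonomy_names user_label_map (build_label_map_py model_labels taxonomy_names user_label_map)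

-- ===== LEMMAS AND PROOFS =====

-- the keys a value-function insert fold appends to a dict whose key list is ks, in order
def pvFresh (ks : List String) : List String → List String
  | [] => []
  | m :: L => if m ∈ ks then pvFresh ks L else m :: pvFresh (m :: ks) L

theorem pvFresh_congr (ks ks' L : List String) (h : ∀ x, x ∈ ks ↔ x ∈ ks') :
    pvFresh ks L = pvFresh ks' L := by
  induction L generalizing ks ks' with
  | nil => rfl
  | cons m L ih =>
      simp only [pvFresh]
      by_cases hm : m ∈ ks
      · rw [if_pos hm, if_pos ((h m).mp hm), ih ks ks' h]
      · rw [if_neg hm, if_neg (fun hk => hm ((h m).mpr hk))]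
        congr 1
        exact ih _ _ (by intro x; simp [h x])

theorem pvFresh_subset {x : String} {ks L : List String} (hx : x ∈ pvFresh ks L) : x ∈ L := by
  induction L generalizing ks with
  | nil => simp [pvFresh] at hx
  | cons m L ih =>
      simp only [pvFresh] at hx
      by_cases hm : m ∈ ks
      · rw [if_pos hm] at hx; exact List.mem_cons_of_mem _ (ih hx)
      · rw [if_neg hm] at hx
        rcases List.mem_cons.mp hx with h | h
        · simp [h]
        · exact List.mem_cons_of_mem _ (ih h)

theorem pv_not_mem_keys {d : PySem.Dict String String} {m : String}
    (h : d.contains m = false) : m ∉ d.keys := by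
  intro hm
  have h2 := (PySem.Dict.contains_iff_mem_keys d m).mpr hm
  simp [h2] at h

-- a fold of inserts whose value depends only on the key: overwrites in place, fresh keys append
theorem pvFoldInsert_items (f : String → String) (L : List String) :
    ∀ d : PySem.Dict String String,
      (L.foldl (fun m ml => m.insert ml (f ml)) d).items
        = d.items.map (fun p => if p.1 ∈ L then (p.1, f p.1) else p)
          ++ (pvFresh d.keys L).map (fun k => (k, f k)) := by
  induction L with
  | nil => intro d; simp [pvFresh]
  | cons m L ih =>
      intro d
      rw [List.foldl_cons, ih]
      by_cases h : d.contains m = true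
      · have hkeys := PySem.Dict.keys_insert_of_contains d (f m) h
        have hmem : m ∈ d.keys := (PySem.Dict.contains_iff_mem_keys d m).mp h
        rw [PySem.Dict.items_insert_of_contains d (f m) h, hkeys, List.map_map]
        have hfr : pvFresh d.keys (m :: L) = pvFresh d.keys L := by
          simp [pvFresh, hmem]
        rw [hfr]
        congr 1
        apply List.map_congr_left
        intro p _
        by_cases hp : p.1 = m
        · simp [hp, ite_self]
        · simp [hp]
      · have h' : d.contains m = false := by simpa using h
        have hmem : m ∉ d.keys := pv_not_mem_keys h'
        rw [PySem.Dict.items_insert_of_not_contains d (f m) h',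
            PySem.Dict.keys_insert_of_not_contains d (f m) h']
        have hfr : pvFresh d.keys (m :: L) = m :: pvFresh (m :: d.keys) L := by
          simp [pvFresh, hmem]
        have hcg : pvFresh (d.keys ++ [m]) L = pvFresh (m :: d.keys) L :=
          pvFresh_congr _ _ _ (by intro x; simp [or_comm])
        rw [hcg, hfr, List.map_append, List.map_cons]
        have hfront : d.items.map (fun p => if p.1 ∈ L then (p.1, f p.1) else p)
            = d.items.map (fun p => if p.1 ∈ m :: L then (p.1, f p.1) else p) := by
          apply List.map_congr_left
          intro p hp
          have hpm : p.1 ≠ m := by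
            intro he
            exact hmem (he ▸ List.mem_map_of_mem hp)
          simp [hpm]
        simp [hfront, ite_self]

-- inserts never remove keys: contains is monotone along any fold of such steps
theorem pvContains_foldl_mono (step : PySem.Dict String String → String → PySem.Dict String String)
    (hstep : ∀ d x y, d.contains y = true → (step d x).contains y = true) :
    ∀ (L : List String) (d : PySem.Dict String String) (y : String),
      d.contains y = true → (L.foldl step d).contains y = true := by
  intro L
  induction L with
  | nil => intro d y h; simpa using h
  | cons m L ih => intro d y h; exact ih (step d m) y (hstep d m y h)

theorem pvContains_foldl_insert (f : String → String) :
    ∀ (L : List String) (d : PySem.Dict String String) (ml : String), ml ∈ L →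
      (L.foldl (fun m x => m.insert x (f x)) d).contains ml = true := by
  intro L
  induction L with
  | nil => intro d ml h; simp at h
  | cons m L ih =>
      intro d ml h
      rw [List.foldl_cons]
      rcases List.mem_cons.mp h with he | hL
      · exact pvContains_foldl_mono _
          (fun d x y hy => by simp [PySem.Dict.contains_insert, hy]) L _ ml
          (by simp [he])
      · exact ih _ ml hL

-- a conditional overwrite pass over keys the dict already has: a pure in-place map of the items
theorem pvPass_items (c : String → Bool) (f : String → String) (L : List String) :
    ∀ d : PySem.Dict String String, (∀ ml ∈ L, d.contains ml = true) →
      (L.foldl (fun m ml => if c ml then m.insert ml (f ml) else m) d).items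
        = d.items.map (fun p => if p.1 ∈ L ∧ c p.1 = true then (p.1, f p.1) else p) := by
  induction L with
  | nil =>
      intro d _
      simp
  | cons m L ih =>
      intro d hd
      rw [List.foldl_cons]
      by_cases hc : c m = true
      · have hcont : d.contains m = true := hd m (by simp)
        rw [if_pos hc]
        rw [ih _ (fun ml hml => by
          simp [PySem.Dict.contains_insert, hd ml (List.mem_cons_of_mem _ hml)])]
        rw [PySem.Dict.items_insert_of_contains d (f m) hcont, List.map_map]
        apply List.map_congr_left
        intro p _
        by_cases hp : p.1 = m
        · simp [hp, hc, ite_self]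
        · simp [hp]
      · rw [if_neg hc]
        rw [ih _ (fun ml hml => hd ml (List.mem_cons_of_mem _ hml))]
        apply List.map_congr_left
        intro p _
        by_cases hp : p.1 = m
        · simp [hp, hc]
        · simp [hp]

-- the value A's if/elif chain assigns to a model label (all branches insert at the same key)
def pvVal (T : List String) (U : Option (List (String × String))) (ml : String) : String :=
  if (match U with | none => false | some l => !l.isEmpty) && (pvUserD U).contains ml then
    (pvUserD U).getD ml ml
  else if T.contains ml then ml
  else if (pvTaxNorm T).contains (pvNorm ml) then (pvTaxNorm T).getD (pvNorm ml) ml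
  else ml

theorem pv_empty_items : (PySem.Dict.empty : PySem.Dict String String).items = [] := rfl
theorem pv_empty_keys : (PySem.Dict.empty : PySem.Dict String String).keys = [] := rfl

-- A's fold, characterized: first occurrences of the labels, each paired with pvVal
theorem pvA_items (L T : List String) (U : Option (List (String × String))) :
    build_label_map_py L T U = (pvFresh [] L).map (fun k => (k, pvVal T U k)) := by
  unfold build_label_map_py
  have hstep : (fun (mapping : PySem.Dict String String) ml =>
      if (match U with | none => false | some l => !l.isEmpty) && (pvUserD U).contains ml then
        mapping.insert ml ((pvUserD U).getD ml ml)
      else if T.contains ml then mapping.insert ml ml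
      else if (pvTaxNorm T).contains (pvNorm ml) then
        mapping.insert ml ((pvTaxNorm T).getD (pvNorm ml) ml)
      else mapping.insert ml ml)
      = fun (mapping : PySem.Dict String String) ml => mapping.insert ml (pvVal T U ml) := by
    funext mapping ml
    unfold pvVal
    split_ifs <;> rfl
  show (L.foldl _ PySem.Dict.empty).items = _
  rw [hstep, pvFoldInsert_items (pvVal T U) L PySem.Dict.empty, pv_empty_items, pv_empty_keys]
  simp

-- B's layers, characterized: the same list of pairs
theorem pvB_items (L T : List String) (U : Option (List (String × String))) :
    build_label_map_py_alt L T U = (pvFresh [] L).map (fun k => (k, pvVal T U k)) := by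
  have hmono : ∀ (c : String → Bool) (f : String → String) (d : PySem.Dict String String)
      (x y : String), d.contains y = true →
      ((if c x then d.insert x (f x) else d).contains y) = true := by
    intro c f d x y hy
    by_cases hc : c x = true <;> simp [hc, PySem.Dict.contains_insert, hy]
  have h0 : (L.foldl (fun (mapping : PySem.Dict String String) ml => mapping.insert ml ml)
      PySem.Dict.empty).items = (pvFresh [] L).map (fun k => (k, k)) := by
    have h := pvFoldInsert_items (fun ml => ml) L PySem.Dict.empty
    simp only [] at h
    rw [h, pv_empty_items, pv_empty_keys]
    simp
  have hc0 : ∀ ml ∈ L, (L.foldl (fun (mapping : PySem.Dict String String) ml =>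
      mapping.insert ml ml) PySem.Dict.empty).contains ml = true := fun ml hml =>
    pvContains_foldl_insert (fun x => x) L _ ml hml
  have h1 := pvPass_items (fun ml => (pvTaxNorm T).contains (pvNorm ml))
    (fun ml => (pvTaxNorm T).getD (pvNorm ml) ml) L
    (L.foldl (fun (mapping : PySem.Dict String String) ml => mapping.insert ml ml)
      PySem.Dict.empty) hc0
  simp only [] at h1
  have hc1 : ∀ ml ∈ L, (L.foldl (fun (mapping : PySem.Dict String String) ml =>
      if (pvTaxNorm T).contains (pvNorm ml) then mapping.insert ml ((pvTaxNorm T).getD (pvNorm ml) ml)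
      else mapping) (L.foldl (fun (mapping : PySem.Dict String String) ml =>
      mapping.insert ml ml) PySem.Dict.empty)).contains ml = true := fun ml hml =>
    pvContains_foldl_mono _
      (fun d x y hy => hmono (fun ml => (pvTaxNorm T).contains (pvNorm ml)) _ d x y hy)
      L _ ml (hc0 ml hml)
  have h2 := pvPass_items (fun ml => T.contains ml) (fun ml => ml) L
    (L.foldl (fun (mapping : PySem.Dict String String) ml =>
      if (pvTaxNorm T).contains (pvNorm ml) then mapping.insert ml ((pvTaxNorm T).getD (pvNorm ml) ml)
      else mapping) (L.foldl (fun (mapping : PySem.Dict String String) ml =>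
      mapping.insert ml ml) PySem.Dict.empty)) hc1
  simp only [] at h2
  have hc2 : ∀ ml ∈ L, (L.foldl (fun (mapping : PySem.Dict String String) ml =>
      if T.contains ml then mapping.insert ml ml else mapping)
      (L.foldl (fun (mapping : PySem.Dict String String) ml =>
      if (pvTaxNorm T).contains (pvNorm ml) then mapping.insert ml ((pvTaxNorm T).getD (pvNorm ml) ml)
      else mapping) (L.foldl (fun (mapping : PySem.Dict String String) ml =>
      mapping.insert ml ml) PySem.Dict.empty))).contains ml = true := fun ml hml =>
    pvContains_foldl_mono _
      (fun d x y hy => hmono (fun ml => T.contains ml) (fun ml => ml) d x y hy)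
      L _ ml (hc1 ml hml)
  cases U with
  | none =>
      unfold build_label_map_py_alt
      dsimp only
      rw [h2, h1, h0, List.map_map, List.map_map]
      apply List.map_congr_left
      intro k hk
      have hkL : k ∈ L := pvFresh_subset hk
      by_cases hb2 : (pvTaxNorm T).contains (pvNorm k) = true <;>
        by_cases hb3 : k ∈ T <;>
        simp [pvVal, hkL, hb2, hb3]
  | some l =>
      by_cases hl : l.isEmpty
      · unfold build_label_map_py_alt
        dsimp only
        rw [if_pos hl, h2, h1, h0, List.map_map, List.map_map]
        apply List.map_congr_left
        intro k hk
        have hkL : k ∈ L := pvFresh_subset hk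
        have hu : (!l.isEmpty) = false := by simp [hl]
        by_cases hb2 : (pvTaxNorm T).contains (pvNorm k) = true <;>
          by_cases hb3 : k ∈ T <;>
          simp [pvVal, hkL, hb2, hb3, hu]
      · unfold build_label_map_py_alt
        dsimp only
        rw [if_neg hl]
        have h3 := pvPass_items (fun ml => (pvUserD (some l)).contains ml)
          (fun ml => (pvUserD (some l)).getD ml ml) L _ hc2
        simp only [] at h3
        rw [h3, h2, h1, h0, List.map_map, List.map_map, List.map_map]
        apply List.map_congr_left
        intro k hk
        have hkL : k ∈ L := pvFresh_subset hk
        have hu : (!l.isEmpty) = true := by simp [hl]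
        by_cases hb2 : (pvTaxNorm T).contains (pvNorm k) = true <;>
          by_cases hb3 : k ∈ T <;>
          by_cases hb4 : (pvUserD (some l)).contains k = true <;>
          simp [pvVal, hkL, hb2, hb3, hb4, hu]

-- ===== VERDICT (by name: the statement is the Claim_ definition above) =====
theorem build_label_map_py_spec : Claim_equal_build_label_map_py := by
  intro L T U _
  unfold Spec_build_label_map_py
  rw [pvA_items, pvB_items]
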